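-- pv_equiv track=rewrite | github.com/KemalOenen/decomposing-vibrations | icsel.py | get_dihedral_subsets
-- ===== SOURCE A (Python) =====
-- import itertools
--
-- def get_dihedral_subsets(symmetric_dihedrals,num_bonds,num_angles,idof,n_tau) -> list:
--     symmetric_dihedrals_list, dihedrals = [], []
--     #TODO: check for special cases
--
--     for ind_dihedral in symmetric_dihedrals.keys():
--         if symmetric_dihedrals[ind_dihedral] not in symmetric_dihedrals_list:
--             symmetric_dihedrals_list.append(symmetric_dihedrals[ind_dihedral])
--     for i in range(0,len(symmetric_dihedrals_list)+1):
--         for dihedral_subset in itertools.combinations(symmetric_dihedrals_list,i):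
--             flat_dihedral_subset = [item for sublist in dihedral_subset for item in sublist]
--             if n_tau <= len(list(flat_dihedral_subset)) <= n_tau+1:
--                 dihedrals.append(list(flat_dihedral_subset))
--     return dihedrals
-- ===== SOURCE B (Python) =====
-- def _collect(rest, k, acc, n_tau, out):
--     # backtracking over the tail of the group list, pruning as soon as the
--     # accumulated flattened prefix is already longer than n_tau + 1
--     if len(acc) > n_tau + 1:
--         return
--     if k == 0:
--         if n_tau <= len(acc):
--             out.append(acc)
--         return
--     if len(rest) < k:
--         return
--     _collect(rest[1:], k - 1, acc + rest[0], n_tau, out)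
--     _collect(rest[1:], k, acc, n_tau, out)
--
--
-- def get_dihedral_subsets(symmetric_dihedrals, num_bonds, num_angles, idof, n_tau) -> list:
--     groups = []
--     for g in symmetric_dihedrals.values():
--         if g not in groups:
--             groups.append(g)
--     out = []
--     for i in range(len(groups) + 1):
--         _collect(groups, i, [], n_tau, out)
--     return out
-- ===== Notes on version B (the rewrite author's own statement) =====
-- stated objective: alternative
-- what changed: A deduplicates via keys+lookup and exhaustively enumerates every itertools.combinations subset of every size before filtering by flattened length; B deduplicates the dict's values directly and replaces the full enumeration by a backtracking recursion over the group list that prunes any branch whose accumulated flattened prefix already exceeds n_tau+1 and any call with fewer remaining groups than still needed (intended as faster; …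
import Mathlib
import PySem

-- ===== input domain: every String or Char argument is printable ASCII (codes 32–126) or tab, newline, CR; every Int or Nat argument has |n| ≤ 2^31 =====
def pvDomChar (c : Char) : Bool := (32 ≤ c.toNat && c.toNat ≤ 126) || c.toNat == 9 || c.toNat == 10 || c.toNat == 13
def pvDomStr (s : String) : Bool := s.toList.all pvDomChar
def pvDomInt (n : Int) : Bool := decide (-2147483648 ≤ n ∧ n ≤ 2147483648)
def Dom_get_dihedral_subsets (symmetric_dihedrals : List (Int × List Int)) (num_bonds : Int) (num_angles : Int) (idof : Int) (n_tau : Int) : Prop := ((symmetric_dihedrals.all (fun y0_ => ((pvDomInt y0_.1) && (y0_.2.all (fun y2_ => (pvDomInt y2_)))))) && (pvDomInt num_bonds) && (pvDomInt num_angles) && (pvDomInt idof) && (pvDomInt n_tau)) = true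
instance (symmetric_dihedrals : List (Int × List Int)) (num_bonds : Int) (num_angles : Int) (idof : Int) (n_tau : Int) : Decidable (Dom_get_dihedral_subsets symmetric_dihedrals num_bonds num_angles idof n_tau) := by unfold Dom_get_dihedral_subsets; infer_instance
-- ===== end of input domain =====

-- B replaces A's exhaustive itertools.combinations enumeration by a backtracking
-- recursion over the group list that prunes any branch whose accumulated flattened
-- prefix already exceeds n_tau + 1, so subsets that cannot meet the length window
-- are never enumerated (no speed is claimed; a timing run could not confirm it
-- at the largest sizes).

-- ===== PORT A =====
-- literal port of A: dedup the dict's values via keys + lookup, then for every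
-- subset size i enumerate all combinations and filter by flattened length
def get_dihedral_subsets (symmetric_dihedrals : List (Int × List Int)) (num_bonds : Int) (num_angles : Int) (idof : Int) (n_tau : Int) : List (List Int) :=
  let d := PySem.Dict.ofList symmetric_dihedrals
  -- for ind_dihedral in symmetric_dihedrals.keys(): …  (d[k] is total here since k ∈ d.keys)
  let symmetric_dihedrals_list :=
    d.keys.foldl (fun acc k =>
      if d.getD k [] ∈ acc then acc else acc ++ [d.getD k []]) []
  -- for i in range(0, len(list)+1): for c in itertools.combinations(list, i): …
  (PySem.List.pyRange 0 (PySem.List.len symmetric_dihedrals_list + 1) 1).foldl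
    (fun dihedrals i =>
      (PySem.List.combinations symmetric_dihedrals_list i.toNat).foldl
        (fun dh c =>
          let flat := c.flatten
          if n_tau ≤ PySem.List.len flat ∧ PySem.List.len flat ≤ n_tau + 1 then
            dh ++ [flat]
          else dh)
        dihedrals)
    []

-- ===== PORT B =====
-- literal port of Source B's _collect: backtracking with pruning
def pvCollect (rest : List (List Int)) (k : Nat) (acc : List Int) (n_tau : Int) (out : List (List Int)) : List (List Int) :=
  if n_tau + 1 < PySem.List.len acc then out
  else
    match k with
    | 0 => if n_tau ≤ PySem.List.len acc then out ++ [acc] else out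
    | Nat.succ k' =>
      if PySem.List.len rest < ((k' : Int) + 1) then out
      else
        match rest with
        | [] => out   -- unreachable: len rest ≥ k ≥ 1
        | g :: rs => pvCollect rs (k' + 1) acc n_tau (pvCollect rs k' (acc ++ g) n_tau out)
termination_by rest.length
decreasing_by all_goals simp

def get_dihedral_subsets_alt (symmetric_dihedrals : List (Int × List Int)) (num_bonds : Int) (num_angles : Int) (idof : Int) (n_tau : Int) : List (List Int) :=
  let d := PySem.Dict.ofList symmetric_dihedrals
  let groups := d.values.foldl (fun acc g => if g ∈ acc then acc else acc ++ [g]) []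
  (PySem.List.pyRange 0 (PySem.List.len groups + 1) 1).foldl
    (fun out i => pvCollect groups i.toNat [] n_tau out) []

-- ===== PRECONDITION & SPEC =====
def Spec_get_dihedral_subsets (symmetric_dihedrals : List (Int × List Int)) (num_bonds : Int) (num_angles : Int) (idof : Int) (n_tau : Int) (out : List (List Int)) : Prop := out = get_dihedral_subsets_alt symmetric_dihedrals num_bonds num_angles idof n_tau
instance (symmetric_dihedrals : List (Int × List Int)) (num_bonds : Int) (num_angles : Int) (idof : Int) (n_tau : Int) (out : List (List Int)) : Decidable (Spec_get_dihedral_subsets symmetric_dihedrals num_bonds num_angles idof n_tau out) := by unfold Spec_get_dihedral_subsets; infer_instance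

-- ===== CLAIM (what is proved, stated in full; the proofs are below) =====
def Claim_equal_get_dihedral_subsets : Prop := ∀ (symmetric_dihedrals : List (Int × List Int)) (num_bonds : Int) (num_angles : Int) (idof : Int) (n_tau : Int), Dom_get_dihedral_subsets symmetric_dihedrals num_bonds num_angles idof n_tau → Spec_get_dihedral_subsets symmetric_dihedrals num_bonds num_angles idof n_tau (get_dihedral_subsets symmetric_dihedrals num_bonds num_angles idof n_tau)

-- ===== LEMMAS AND PROOFS =====

-- the per-size segment both programs produce
def pvSeg (groups : List (List Int)) (n_tau : Int) (acc : List Int) (r : Nat) : List (List Int) :=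
  (PySem.List.combinations groups r).filterMap (fun c =>
    if n_tau ≤ PySem.List.len (acc ++ c.flatten) ∧ PySem.List.len (acc ++ c.flatten) ≤ n_tau + 1 then
      some (acc ++ c.flatten)
    else none)

theorem pvCollect_spec (rest : List (List Int)) (k : Nat) (acc : List Int) (n_tau : Int)
    (out : List (List Int)) :
    pvCollect rest k acc n_tau out = out ++ pvSeg rest n_tau acc k := by
  induction rest generalizing k acc out with
  | nil =>
    rw [pvCollect.eq_def]
    match k with
    | 0 =>
      simp only [pvSeg, PySem.List.combinations_zero, List.filterMap_cons, List.filterMap_nil,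
        List.flatten_nil, List.append_nil, PySem.List.len_eq]
      split_ifs <;> simp_all <;> try omega
    | Nat.succ k' =>
      simp [pvSeg, PySem.List.combinations_nil_succ]
  | cons g rs ih =>
    rw [pvCollect.eq_def]
    by_cases hp : n_tau + 1 < PySem.List.len acc
    · rw [if_pos hp]
      have : pvSeg (g :: rs) n_tau acc k = [] := by
        simp only [pvSeg, List.filterMap_eq_nil_iff]
        intro c _
        rw [if_neg]
        rintro ⟨-, h2⟩
        simp only [PySem.List.len_eq, List.length_append] at h2 hp
        omega
      simp [this]
    · rw [if_neg hp]
      match k with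
      | 0 =>
        simp only [pvSeg, PySem.List.combinations_zero, List.filterMap_cons, List.filterMap_nil,
          List.flatten_nil, List.append_nil, PySem.List.len_eq] at *
        split_ifs <;> simp_all
      | Nat.succ k' =>
        dsimp only
        by_cases hl : PySem.List.len (g :: rs) < ((k' : Int) + 1)
        · rw [if_pos hl]
          have : PySem.List.combinations (g :: rs) (k' + 1) = [] := by
            apply PySem.List.combinations_eq_nil_of_length_lt
            simp only [PySem.List.len_eq] at hl
            omega
          simp [pvSeg, this]
        · rw [if_neg hl]
          rw [ih, ih]
          simp only [pvSeg, PySem.List.combinations_cons_succ, List.filterMap_append,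
            List.filterMap_map, List.append_assoc, Function.comp_def, List.flatten_cons]

-- A's deduped list equals B's: values = keys.map (getD · []) on a Dict (keys are Nodup)
theorem pv_groups_eq (symmetric_dihedrals : List (Int × List Int)) :
    (PySem.Dict.ofList symmetric_dihedrals).keys.foldl (fun acc k =>
        if (PySem.Dict.ofList symmetric_dihedrals).getD k [] ∈ acc then acc
        else acc ++ [(PySem.Dict.ofList symmetric_dihedrals).getD k []]) [] =
    (PySem.Dict.ofList symmetric_dihedrals).values.foldl
      (fun acc g => if g ∈ acc then acc else acc ++ [g]) [] := by
  rw [PySem.Dict.values_eq_map_keys _ (PySem.Dict.nodup_keys_ofList _) ([] : List Int),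
    List.foldl_map]

-- A's inner filter-fold produces the same segment
theorem pv_inner_eq (groups : List (List Int)) (n_tau : Int) (r : Nat) (dh0 : List (List Int)) :
    (PySem.List.combinations groups r).foldl
      (fun dh c =>
        let flat := c.flatten
        if n_tau ≤ PySem.List.len flat ∧ PySem.List.len flat ≤ n_tau + 1 then dh ++ [flat]
        else dh)
      dh0 = dh0 ++ pvSeg groups n_tau [] r := by
  unfold pvSeg
  induction PySem.List.combinations groups r generalizing dh0 with
  | nil => simp
  | cons c cs ih =>
    simp only [List.foldl_cons, List.filterMap_cons, List.nil_append]
    split_ifs with h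
    · rw [ih]; simp
    · rw [ih]; simp

-- ===== VERDICT (by name: the statement is the Claim_ definition above) =====
theorem get_dihedral_subsets_spec : Claim_equal_get_dihedral_subsets := by
  intro symmetric_dihedrals num_bonds num_angles idof n_tau _
  simp only [Spec_get_dihedral_subsets, get_dihedral_subsets, get_dihedral_subsets_alt]
  rw [pv_groups_eq]
  generalize ((PySem.Dict.ofList symmetric_dihedrals).values.foldl
      (fun acc g => if g ∈ acc then acc else acc ++ [g]) []) = groups
  apply PySem.List.foldl_congr_mem
  intro dh i _
  rw [pv_inner_eq, pvCollect_spec]
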